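-- pv_equiv track=rewrite | github.com/angiescetta/simulador-crecimiento-urbano | src/data_sources.py | simplify_road_type
-- ===== SOURCE A (Python) =====
-- def simplify_road_type(org_type, road_types_dict):
--     """ Maps OSM road type to integer types in road_types_dict. """
--
--     if not isinstance(org_type, list):
--         org_type = [org_type]
--
--     # Check if all types are link type
--     # if not remove all link types
--     is_link = ['link' in t for t in org_type]
--     if sum(is_link) == len(org_type):
--         org_type = [t.split('_link')[0] for t in org_type]
--     else:
--         org_type = [t for t in org_type if 'link' not in t]
--
--     # Remove all types not in dict
--     org_type = [t if t in road_types_dict.keys() else 'unknown'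
--                 for t in org_type]
--     assert len(org_type) > 0
--
--     tp = max(org_type, key=lambda x: road_types_dict[x])
--     return road_types_dict[tp]
-- ===== SOURCE B (Python) =====
-- def simplify_road_type(org_type, road_types_dict):
--     """Dedup the cleaned types into a set, then scan the priority TABLE once:
--     the answer is the max dict value among selected keys (a key is selected if
--     it is a cleaned type, or it is 'unknown' when some cleaned type is missing)."""
--     if not isinstance(org_type, list):
--         org_type = [org_type]
--     if all('link' in t for t in org_type):
--         keys = {t.split('_link')[0] for t in org_type}
--     else:
--         keys = {t for t in org_type if 'link' not in t}
--     use_unknown = not all(k in road_types_dict for k in keys)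
--     return max(v for k, v in road_types_dict.items()
--                if k in keys or (use_unknown and k == 'unknown'))
-- ===== Notes on version B (the rewrite author's own statement) =====
-- stated objective: alternative
-- what changed: B dedups the cleaned road types into a set and then finds the answer by a single scan of the priority table (dict items), taking the max value among selected keys, instead of A's remapped per-element list and max(key=dict lookup) over the input list.
import Mathlib
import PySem

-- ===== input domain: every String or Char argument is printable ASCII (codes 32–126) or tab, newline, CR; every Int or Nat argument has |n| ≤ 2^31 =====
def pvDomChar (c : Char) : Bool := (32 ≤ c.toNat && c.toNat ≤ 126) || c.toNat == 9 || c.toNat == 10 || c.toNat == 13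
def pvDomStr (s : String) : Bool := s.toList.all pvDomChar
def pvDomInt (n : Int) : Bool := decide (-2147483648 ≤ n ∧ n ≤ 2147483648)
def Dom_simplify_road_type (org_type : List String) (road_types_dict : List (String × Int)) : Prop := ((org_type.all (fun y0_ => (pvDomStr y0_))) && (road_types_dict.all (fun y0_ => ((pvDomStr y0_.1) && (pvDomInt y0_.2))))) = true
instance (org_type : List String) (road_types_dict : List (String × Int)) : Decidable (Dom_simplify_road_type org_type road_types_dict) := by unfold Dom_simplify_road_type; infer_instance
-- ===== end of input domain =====

-- B dedups the cleaned types into a set and finds the answer by one scan of the priority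
-- table (the dict's items), taking the max value among selected keys, instead of A's
-- remapped per-element list plus max(key=dict lookup) over the input list (objective: alternative).

-- t.split('_link')[0] (split with a non-empty separator always returns a non-empty list,
-- so the `| _ => t` fallback is never reached; shared transliteration helper of both ports)
def pvSplitKey (t : String) : String :=
  match PySem.Str.split? t "_link" with
  | some (h :: _) => h
  | _ => t

-- ===== PORT A =====
def simplify_road_type (org_type : List String) (road_types_dict : List (String × Int)) : Int :=
  let d := PySem.Dict.ofList road_types_dict
  let is_link := org_type.map (fun t => PySem.Str.isIn "link" t)
  let org1 :=
    if is_link.count true = org_type.length then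
      org_type.map pvSplitKey
    else
      org_type.filter (fun t => !PySem.Str.isIn "link" t)
  let org2 := org1.map (fun t => if d.contains t then t else "unknown")
  -- assert len(org_type) > 0 and dict lookups: Python raises exactly where Pre_ fails;
  -- there max? is none / getD's default is read, and the port returns 0.
  match PySem.List.max? org2 (fun x => d.getD x 0) with
  | some tp => d.getD tp 0
  | none => 0

-- ===== PORT B =====
def simplify_road_type_alt (org_type : List String) (road_types_dict : List (String × Int)) : Int :=
  let d := PySem.Dict.ofList road_types_dict
  let keys : PySem.Set String :=
    if org_type.all (fun t => PySem.Str.isIn "link" t) then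
      PySem.Set.ofList (org_type.map pvSplitKey)
    else
      PySem.Set.ofList (org_type.filter (fun t => !PySem.Str.isIn "link" t))
  let use_unknown := !(keys.all fun k => d.contains k)
  -- max(generator) over the selected dict values; empty selection is Python's ValueError,
  -- excluded by Pre_, where the port returns 0.
  match PySem.List.max?
      ((d.items.filter (fun p => keys.contains p.1 || (use_unknown && p.1 == "unknown"))).map
        (fun p => p.2))
      (fun v => v) with
  | some v => v
  | none => 0

-- ===== PRECONDITION & SPEC =====
-- the cleaned key list A looks up
def pvClean (org_type : List String) : List String :=
  if org_type.all (fun t => PySem.Str.isIn "link" t) then org_type.map pvSplitKey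
  else org_type.filter (fun t => !PySem.Str.isIn "link" t)

-- Pre_ excludes exactly the inputs where A raises: the empty list (AssertionError) and
-- inputs where some cleaned type is missing from the dict while 'unknown' is too (KeyError).
def Pre_simplify_road_type (org_type : List String) (road_types_dict : List (String × Int)) : Prop :=
  org_type ≠ [] ∧
  ((pvClean org_type).all (fun k => (PySem.Dict.ofList road_types_dict).contains k) = true ∨
    (PySem.Dict.ofList road_types_dict).contains "unknown" = true)
instance (org_type : List String) (road_types_dict : List (String × Int)) : Decidable (Pre_simplify_road_type org_type road_types_dict) := by unfold Pre_simplify_road_type; infer_instance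

def pvWitness_simplify_road_type : List String × (List (String × Int)) :=
  (["residential", "primary_link"], [("residential", 2), ("primary", 3), ("unknown", 0)])

def Spec_simplify_road_type (org_type : List String) (road_types_dict : List (String × Int)) (out : Int) : Prop := out = simplify_road_type_alt org_type road_types_dict
instance (org_type : List String) (road_types_dict : List (String × Int)) (out : Int) : Decidable (Spec_simplify_road_type org_type road_types_dict out) := by unfold Spec_simplify_road_type; infer_instance

-- ===== CLAIM (what is proved, stated in full; the proofs are below) =====
def Claim_equal_simplify_road_type : Prop := ∀ (org_type : List String) (road_types_dict : List (String × Int)), Dom_simplify_road_type org_type road_types_dict → Pre_simplify_road_type org_type road_types_dict → Spec_simplify_road_type org_type road_types_dict (simplify_road_type org_type road_types_dict)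

-- ===== LEMMAS AND PROOFS =====

-- sum(is_link) == len(org_type)  ↔  all('link' in t for t in org_type)
theorem pv_count_true_eq_length (l : List String) (p : String → Bool) :
    (List.count true (l.map (fun t => p t)) = l.length) ↔ l.all p = true := by
  have h1 : List.count true (l.map (fun t => p t)) = l.countP p := by
    rw [List.count_eq_countP, List.countP_map]
    congr 1
    funext a
    cases h : p a <;> simp [Function.comp, h]
  rw [h1, List.countP_eq_length, List.all_eq_true]

-- ===== VERDICT (by name: the statement is the Claim_ definition above) =====
theorem simplify_road_type_spec : Claim_equal_simplify_road_type := by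
  intro org_type road_types_dict _ hpre
  obtain ⟨hne, hdict⟩ := hpre
  unfold Spec_simplify_road_type simplify_road_type simplify_road_type_alt
  show (match PySem.List.max?
        ((if List.count true (org_type.map (fun t => PySem.Str.isIn "link" t)) = org_type.length
            then org_type.map pvSplitKey
            else org_type.filter (fun t => !PySem.Str.isIn "link" t)).map
          (fun t => if (PySem.Dict.ofList road_types_dict).contains t then t else "unknown"))
        (fun x => (PySem.Dict.ofList road_types_dict).getD x 0) with
      | some tp => (PySem.Dict.ofList road_types_dict).getD tp 0
      | none => 0)
    = (match PySem.List.max?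
          (((PySem.Dict.ofList road_types_dict).items.filter
              (fun p => PySem.Set.contains
                  (if org_type.all (fun t => PySem.Str.isIn "link" t) then
                    PySem.Set.ofList (org_type.map pvSplitKey)
                  else PySem.Set.ofList (org_type.filter (fun t => !PySem.Str.isIn "link" t))) p.1 ||
                ((!List.all
                    (if org_type.all (fun t => PySem.Str.isIn "link" t) then
                      PySem.Set.ofList (org_type.map pvSplitKey)
                    else PySem.Set.ofList (org_type.filter (fun t => !PySem.Str.isIn "link" t)))
                    (fun k => (PySem.Dict.ofList road_types_dict).contains k)) && p.1 == "unknown"))).map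
            (fun p => p.2))
          (fun v => v) with
      | some v => v
      | none => 0)
  set d := PySem.Dict.ofList road_types_dict with hd
  set remap : String → String := fun t => if d.contains t then t else "unknown" with hremap
  set f : String → Int := fun x => d.getD x 0 with hf
  set clean := pvClean org_type with hcleandef
  -- A's branch test agrees with B's all-scan, so A's cleaned list is pvClean
  have hA2 : (if List.count true (org_type.map (fun t => PySem.Str.isIn "link" t)) = org_type.length
      then org_type.map pvSplitKey
      else org_type.filter (fun t => !PySem.Str.isIn "link" t)) = clean := by
    rw [hcleandef]; unfold pvClean
    by_cases hall : org_type.all (fun t => PySem.Str.isIn "link" t) = true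
    · rw [if_pos ((pv_count_true_eq_length org_type _).mpr hall), if_pos hall]
    · rw [if_neg (fun h => hall ((pv_count_true_eq_length org_type _).mp h)), if_neg hall]
  -- B's key set is the set of A's cleaned keys
  have hkeyset : (if org_type.all (fun t => PySem.Str.isIn "link" t) then
      PySem.Set.ofList (org_type.map pvSplitKey)
    else PySem.Set.ofList (org_type.filter (fun t => !PySem.Str.isIn "link" t)))
      = PySem.Set.ofList clean := by
    rw [hcleandef]; unfold pvClean
    by_cases hall : org_type.all (fun t => PySem.Str.isIn "link" t) = true
    · rw [if_pos hall, if_pos hall]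
    · rw [if_neg hall, if_neg hall]
  rw [hA2, hkeyset]
  set keys := PySem.Set.ofList clean with hkeysdef
  set uu := !(List.all keys fun k => d.contains k) with huu
  set vals := (d.items.filter (fun p => PySem.Set.contains keys p.1 || (uu && p.1 == "unknown"))).map
      (fun p => p.2) with hvalsdef
  have hnodup : d.keys.Nodup := PySem.Dict.nodup_keys_ofList road_types_dict
  have hmem_keys : ∀ k : String, k ∈ keys ↔ k ∈ clean := by
    intro k; rw [hkeysdef]; exact PySem.Set.mem_ofList clean k
  -- the cleaned list is non-empty under Pre_
  have hclean_ne : clean ≠ [] := by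
    rw [hcleandef]; unfold pvClean
    by_cases hall : org_type.all (fun t => PySem.Str.isIn "link" t) = true
    · rw [if_pos hall]; simpa using hne
    · rw [if_neg hall]
      rw [List.all_eq_true] at hall; push Not at hall
      obtain ⟨t, ht, hlt⟩ := hall
      have hfalse : PySem.Str.isIn "link" t = false := by
        revert hlt; cases PySem.Str.isIn "link" t <;> simp
      refine List.ne_nil_of_mem (List.mem_filter.mpr ⟨ht, ?_⟩)
      show (!PySem.Str.isIn "link" t) = true
      rw [hfalse]; rfl
  -- under Pre_, every remapped cleaned key is present in the dict
  have hPre' : ∀ k ∈ clean, d.contains (remap k) = true := by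
    intro k hk
    by_cases hc : d.contains k = true
    · rw [hremap]; simp [hc]
    · have hr : remap k = "unknown" := by
        rw [hremap]; simp only []
        rw [if_neg (by simpa using hc)]
      rw [hr]
      rcases hdict with hall | hu
      · exact absurd (List.all_eq_true.mp hall k hk) hc
      · exact hu
  -- each remapped cleaned key's priority is one of B's selected values
  have hAmem : ∀ k ∈ clean, f (remap k) ∈ vals := by
    intro k hk
    have hcont := hPre' k hk
    rw [PySem.Dict.contains_eq_isSome_get?] at hcont
    obtain ⟨v, hv⟩ := Option.isSome_iff_exists.mp hcont
    have hitem : (remap k, v) ∈ d.items := PySem.Dict.mem_items_of_get?_eq_some d hv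
    have hfv : f (remap k) = v := by rw [hf]; exact PySem.Dict.getD_of_get?_eq_some d 0 hv
    have hcond : (PySem.Set.contains keys (remap k, v).1 || (uu && (remap k, v).1 == "unknown")) = true := by
      by_cases hc : d.contains k = true
      · have hr : remap k = k := by rw [hremap]; simp [hc]
        simp only [hr]
        simp only [Bool.or_eq_true, PySem.Set.contains_eq_listContains, List.contains_iff_mem]
        exact Or.inl ((hmem_keys k).mpr hk)
      · have hr : remap k = "unknown" := by
          rw [hremap]; simp only []
          rw [if_neg (by simpa using hc)]
        have hallf : (List.all keys fun k => d.contains k) = false := by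
          rw [List.all_eq_false]
          exact ⟨k, (hmem_keys k).mpr hk, by simpa using hc⟩
        have huu' : uu = true := by rw [huu, hallf]; rfl
        simp [hr, huu']
    rw [hfv]
    exact List.mem_map_of_mem (List.mem_filter.mpr ⟨hitem, hcond⟩)
  -- each of B's selected values is the priority of some remapped cleaned key
  have hBmem : ∀ v ∈ vals, ∃ k ∈ clean, v = f (remap k) := by
    intro v hv
    rw [hvalsdef] at hv
    obtain ⟨p, hp, rfl⟩ := List.mem_map.mp hv
    obtain ⟨hitem, hcond⟩ := List.mem_filter.mp hp
    have hgetD : d.getD p.1 0 = p.2 := PySem.Dict.getD_of_mem_items d hitem hnodup 0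
    rcases Bool.or_eq_true_iff.mp hcond with hsel | hsel
    · -- p's key is a cleaned key present in the dict
      have hk : p.1 ∈ clean := (hmem_keys p.1).mp ((PySem.Set.contains_iff keys p.1).mp hsel)
      have hc : d.contains p.1 = true := by
        rw [PySem.Dict.contains_iff_mem_keys]
        exact PySem.Dict.mem_keys_of_mem_items d hitem
      refine ⟨p.1, hk, ?_⟩
      have hr : remap p.1 = p.1 := by rw [hremap]; simp [hc]
      show p.2 = d.getD (remap p.1) 0
      rw [hr]; exact hgetD.symm
    · -- p is the 'unknown' entry, selected because some cleaned key is missing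
      obtain ⟨huu', hpu⟩ := Bool.and_eq_true_iff.mp hsel
      have hpu' : p.1 = "unknown" := by simpa using hpu
      have hallf : (List.all keys fun k => d.contains k) = false := by
        rw [huu] at huu'; simpa using huu'
      obtain ⟨k, hk, hkc⟩ := List.all_eq_false.mp hallf
      have hr : remap k = "unknown" := by
        rw [hremap]; simp only []
        rw [if_neg (by simpa using hkc)]
      refine ⟨k, (hmem_keys k).mp hk, ?_⟩
      show p.2 = d.getD (remap k) 0
      rw [hr, ← hpu']; exact hgetD.symm
  -- both max? computations succeed
  obtain ⟨tp, htp⟩ : ∃ tp, PySem.List.max? (clean.map remap) f = some tp := by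
    cases h : PySem.List.max? (clean.map remap) f with
    | none => exact absurd ((PySem.List.max?_eq_none_iff _ _).mp h) (by simpa using hclean_ne)
    | some tp => exact ⟨tp, rfl⟩
  have hvals_ne : vals ≠ [] := by
    obtain ⟨k, hk⟩ := List.exists_mem_of_ne_nil clean hclean_ne
    exact List.ne_nil_of_mem (hAmem k hk)
  obtain ⟨m, hm⟩ : ∃ m, PySem.List.max? vals (fun v => v) = some m := by
    cases h : PySem.List.max? vals (fun v => v) with
    | none => exact absurd ((PySem.List.max?_eq_none_iff _ _).mp h) hvals_ne
    | some m => exact ⟨m, rfl⟩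
  rw [htp, hm]
  show f tp = m
  -- f tp ≤ m : f tp is a selected value
  have h1 : f tp ≤ m := by
    obtain ⟨k, hk, rfl⟩ := List.mem_map.mp (PySem.List.max?_mem htp)
    exact PySem.List.max?_isMax hm _ (hAmem k hk)
  -- m ≤ f tp : m is the priority of some remapped cleaned key
  have h2 : m ≤ f tp := by
    obtain ⟨k, hk, hmk⟩ := hBmem m (PySem.List.max?_mem hm)
    rw [hmk]
    exact PySem.List.max?_isMax htp (remap k) (List.mem_map_of_mem hk)
  exact le_antisymm h1 h2
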